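-- pv_equiv track=rewrite | github.com/how-i-exit-vim/CS-Contest | picsou/main.py | calc
-- ===== SOURCE A (Python) =====
-- def calc(nombres):
--     l = []
--     part_entiere = 0
--     decimale1 = 0
--     decimale2 = 0
--     for a in nombres:
--         if '.' in a:
--             if a[0] == ".":
--                 a = "0" + a
--             n, d = a.split(".")
--             n = int(n)
--             d = d[:2]
--             d1 = 0
--             d2 = 0
--             if len(d) == 2:
--                 d1 = int(d[0])
--                 d2 = int(d[1])
--             elif len(d) == 1:
--                 d1 = int(d[0])
--
--             # Add 1 per 1
--             decimale1    += d1
--             decimale2    += d2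
--             part_entiere += n
--
--             decimale1    += decimale2 // 10
--             part_entiere += decimale1 // 10
--             decimale1 %= 10
--             decimale2 %= 10
--
--         else:
--             part_entiere += int(a)
--     return f"{part_entiere}.{decimale1}{decimale2}"
-- ===== SOURCE B (Python) =====
-- def _cents(a):
--     # value of one element in hundredths, by integer arithmetic
--     if '.' not in a:
--         return int(a) * 100
--     if a[0] == '.':
--         a = '0' + a
--     n, d = a.split('.')
--     c = int(n) * 100
--     if len(d) >= 1:
--         c += int(d[0]) * 10
--     if len(d) >= 2:
--         c += int(d[1])
--     return c
--
--
-- def calc(nombres):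
--     total = sum(_cents(a) for a in nombres)
--     return f"{total // 100}.{(total % 100) // 10}{total % 10}"
-- ===== Notes on version B (the rewrite author's own statement) =====
-- stated objective: simpler
-- what changed: B sums one integer accumulator of hundredths (a per-element 'cents' helper plus sum()) and recovers the three output fields with // and % once at the end, instead of A's three mutable registers with manual carry propagation after every element.
-- outside the precondition, e.g. on calc(['1.2.3']): A raises ValueError, B raises ValueError; on calc(['1.x']): A raises ValueError, B raises ValueError
import Mathlib
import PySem

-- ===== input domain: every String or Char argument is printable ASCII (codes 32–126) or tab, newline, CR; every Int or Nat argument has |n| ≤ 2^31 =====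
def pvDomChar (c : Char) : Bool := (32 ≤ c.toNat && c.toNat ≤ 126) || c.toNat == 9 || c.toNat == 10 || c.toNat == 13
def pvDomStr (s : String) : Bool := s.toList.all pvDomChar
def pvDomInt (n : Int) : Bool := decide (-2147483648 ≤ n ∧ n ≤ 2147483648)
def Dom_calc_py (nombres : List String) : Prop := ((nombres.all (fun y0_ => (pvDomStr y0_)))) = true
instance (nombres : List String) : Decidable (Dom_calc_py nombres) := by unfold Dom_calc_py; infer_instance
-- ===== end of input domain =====

-- B replaces A's three mutable carry registers by one integer accumulator of hundredths,
-- summed per element and decomposed with // and % only once at the end (objective: simpler).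

-- shared helper: Python's int(d[i]) for a character of d (Pre_ guarantees the index is
-- in range and the character a digit; the defaults never fire inside Pre_)
def pyIntChar (d : List Char) (i : Int) : Int :=
  match PySem.List.pyGet? d i with
  | some c => (PySem.Int.ofChars? [c]).getD 0
  | none => 0

-- ===== PORT A =====
-- the pair (d1, d2) A reads from the truncated decimal part d = d[:2]
def digitsA (d : List Char) : Int × Int :=
  if d.length = 2 then (pyIntChar d 0, pyIntChar d 1)
  else if d.length = 1 then (pyIntChar d 0, 0)
  else (0, 0)

-- one iteration of A's loop over state (part_entiere, decimale1, decimale2)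
def calcStep (st : Int × Int × Int) (s : String) : Int × Int × Int :=
  if PySem.Chars.isIn ['.'] s.toList then
    -- a = "0" + a when a[0] == "."; then n, d = a.split(".")
    match PySem.Chars.split? (if PySem.List.pyGet? s.toList 0 = some '.' then '0' :: s.toList else s.toList) ['.'] with
    | some [n, d] =>
      let nv := (PySem.Int.ofChars? n).getD 0           -- int(n); Pre_ excludes ValueError
      let dp := digitsA (PySem.Chars.slice d none (some 2))   -- d = d[:2]
      let decimale1 := st.2.1 + dp.1
      let decimale2 := st.2.2 + dp.2
      let part := st.1 + nv
      let decimale1' := decimale1 + PySem.Int.floordiv decimale2 10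
      let part' := part + PySem.Int.floordiv decimale1' 10
      (part', PySem.Int.mod decimale1' 10, PySem.Int.mod decimale2 10)
    | _ => st                                           -- unpacking ValueError; outside Pre_
  else (st.1 + (PySem.Int.ofChars? s.toList).getD 0, st.2.1, st.2.2)  -- int(a); Pre_ excludes ValueError

-- f"{part_entiere}.{decimale1}{decimale2}"
def fmtA (st : Int × Int × Int) : String :=
  String.ofList (PySem.Int.toChars st.1 ++ '.' :: (PySem.Int.toChars st.2.1 ++ PySem.Int.toChars st.2.2))

def calc_py (nombres : List String) : String :=
  fmtA (nombres.foldl calcStep (0, 0, 0))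

-- ===== PORT B =====
-- value of one element in hundredths (B's _cents)
def centsOf (s : String) : Int :=
  if !PySem.Chars.isIn ['.'] s.toList then (PySem.Int.ofChars? s.toList).getD 0 * 100
  else
    match PySem.Chars.split? (if PySem.List.pyGet? s.toList 0 = some '.' then '0' :: s.toList else s.toList) ['.'] with
    | some [n, d] =>
      (if 2 ≤ d.length then
        (if 1 ≤ d.length then (PySem.Int.ofChars? n).getD 0 * 100 + pyIntChar d 0 * 10
         else (PySem.Int.ofChars? n).getD 0 * 100) + pyIntChar d 1
       else
        (if 1 ≤ d.length then (PySem.Int.ofChars? n).getD 0 * 100 + pyIntChar d 0 * 10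
         else (PySem.Int.ofChars? n).getD 0 * 100))
    | _ => 0                                            -- unpacking ValueError; outside Pre_

-- f"{total // 100}.{(total % 100) // 10}{total % 10}"
def fmtB (total : Int) : String :=
  String.ofList (PySem.Int.toChars (PySem.Int.floordiv total 100) ++ '.' ::
    (PySem.Int.toChars (PySem.Int.floordiv (PySem.Int.mod total 100) 10) ++
     PySem.Int.toChars (PySem.Int.mod total 10)))

def calc_py_alt (nombres : List String) : String :=
  fmtB ((nombres.map centsOf).sum)

-- ===== PRECONDITION & SPEC =====
-- Pre_ admits exactly the inputs where A returns: for each element with a dot, splitting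
-- (after the leading-dot fix) yields exactly two pieces, the integer part parses with int(),
-- and the first two post-dot characters (those A reads) are digits; elements without a dot
-- must parse with int().  On excluded inputs both Pythons raise ValueError.
def okArg (a : List Char) : Bool :=
  if PySem.Chars.isIn ['.'] a then
    match PySem.Chars.split? (if PySem.List.pyGet? a 0 = some '.' then '0' :: a else a) ['.'] with
    | some [n, d] => (PySem.Int.ofChars? n).isSome && (d.take 2).all PySem.Chars.isdigit
    | _ => false
  else (PySem.Int.ofChars? a).isSome

def Pre_calc_py (nombres : List String) : Prop :=
  (nombres.all (fun s => okArg s.toList)) = true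
instance (nombres : List String) : Decidable (Pre_calc_py nombres) := by
  unfold Pre_calc_py; infer_instance

def pvWitness_calc_py : List String := ["1.5", "2", "-0.75", "."]

def Spec_calc_py (nombres : List String) (out : String) : Prop := out = calc_py_alt nombres
instance (nombres : List String) (out : String) : Decidable (Spec_calc_py nombres out) := by
  unfold Spec_calc_py; infer_instance

-- ===== CLAIM (what is proved, stated in full; the proofs are below) =====
def Claim_equal_calc_py : Prop := ∀ (nombres : List String), Dom_calc_py nombres → Pre_calc_py nombres → Spec_calc_py nombres (calc_py nombres)

-- ===== LEMMAS AND PROOFS =====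

lemma digit_mem (c : Char) (h : PySem.Chars.isdigit c = true) :
    c ∈ ['0','1','2','3','4','5','6','7','8','9'] := by
  simp only [PySem.Chars.isdigit, Bool.and_eq_true, decide_eq_true_eq, Char.le_def] at h
  obtain ⟨h1, h2⟩ := h
  have h1' : 48 ≤ c.toNat := h1
  have h2' : c.toNat ≤ 57 := h2
  have hc : Char.ofNat c.toNat = c := Char.ofNat_toNat c
  set n := c.toNat with hn
  interval_cases n <;> simp_all <;> exact hc ▸ (by decide)

lemma digit_val (c : Char) (h : PySem.Chars.isdigit c = true) :
    0 ≤ (PySem.Int.ofChars? [c]).getD 0 ∧ (PySem.Int.ofChars? [c]).getD 0 < 10 := by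
  have := digit_mem c h
  fin_cases this <;> decide

set_option maxHeartbeats 2000000 in
lemma calcStep_spec (st : Int × Int × Int) (s : String)
    (h : okArg s.toList = true)
    (h1 : 0 ≤ st.2.1) (h2 : st.2.1 < 10) (h3 : 0 ≤ st.2.2) (h4 : st.2.2 < 10) :
    0 ≤ (calcStep st s).2.1 ∧ (calcStep st s).2.1 < 10 ∧
    0 ≤ (calcStep st s).2.2 ∧ (calcStep st s).2.2 < 10 ∧
    (calcStep st s).1 * 100 + (calcStep st s).2.1 * 10 + (calcStep st s).2.2
      = st.1 * 100 + st.2.1 * 10 + st.2.2 + centsOf s := by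
  unfold calcStep centsOf okArg at *
  by_cases hin : PySem.Chars.isIn ['.'] s.toList
  · rw [if_pos hin] at h ⊢
    simp only [hin, Bool.not_true, Bool.false_eq_true, if_false]
    cases hsplit : PySem.Chars.split?
        (if PySem.List.pyGet? s.toList 0 = some '.' then '0' :: s.toList else s.toList) ['.'] with
    | none => rw [hsplit] at h; simp at h
    | some l =>
      rw [hsplit] at h
      rcases l with _ | ⟨n, _ | ⟨d, _ | ⟨e, rest⟩⟩⟩
      · simp at h
      · simp at h
      · simp only [Bool.and_eq_true, Option.isSome_iff_exists] at h
        obtain ⟨⟨nv, hnv⟩, hdig⟩ := h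
        have hslice : PySem.Chars.slice d none (some 2) = d.take 2 := by simp [pysem]
        simp only [hslice, hnv]
        rcases d with _ | ⟨c1, _ | ⟨c2, rest⟩⟩
        · simp only [List.take_nil, digitsA, List.length_nil, Option.getD_some]
          norm_num
          refine ⟨by omega, by omega, by omega, by omega, by omega⟩
        · simp at hdig
          have hv1 := digit_val c1 hdig
          have hp0 : pyIntChar [c1] 0 = (PySem.Int.ofChars? [c1]).getD 0 := by
            simp [pyIntChar, pysem]
          simp only [digitsA, List.length_cons, List.length_nil,
            Option.getD_some]
          norm_num
          refine ⟨by omega, by omega, by omega, by omega, by omega⟩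
        · simp at hdig
          obtain ⟨hd1, hd2⟩ := hdig
          have hv1 := digit_val c1 hd1
          have hv2 := digit_val c2 hd2
          have hp0 : pyIntChar (c1 :: c2 :: rest) 0 = (PySem.Int.ofChars? [c1]).getD 0 := by
            simp [pyIntChar, pysem]
          have hp1 : pyIntChar (c1 :: c2 :: rest) 1 = (PySem.Int.ofChars? [c2]).getD 0 := by
            simp [pyIntChar, pysem]
          have hq0 : pyIntChar [c1, c2] 0 = (PySem.Int.ofChars? [c1]).getD 0 := by
            simp [pyIntChar, pysem]
          have hq1 : pyIntChar [c1, c2] 1 = (PySem.Int.ofChars? [c2]).getD 0 := by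
            simp [pyIntChar, pysem]
          simp only [List.take_succ_cons, List.take_zero, digitsA, List.length_cons,
            List.length_nil, Option.getD_some]
          norm_num
          refine ⟨by omega, by omega, by omega, by omega, by omega⟩
      · simp at h
  · rw [if_neg hin] at h ⊢
    simp only [Bool.not_eq_true] at hin
    simp only [hin, Bool.not_false, if_true]
    refine ⟨h1, h2, h3, h4, by ring⟩

lemma foldl_calcStep_spec (l : List String) (st : Int × Int × Int)
    (hok : (l.all (fun s => okArg s.toList)) = true)
    (h1 : 0 ≤ st.2.1) (h2 : st.2.1 < 10) (h3 : 0 ≤ st.2.2) (h4 : st.2.2 < 10) :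
    0 ≤ (l.foldl calcStep st).2.1 ∧ (l.foldl calcStep st).2.1 < 10 ∧
    0 ≤ (l.foldl calcStep st).2.2 ∧ (l.foldl calcStep st).2.2 < 10 ∧
    (l.foldl calcStep st).1 * 100 + (l.foldl calcStep st).2.1 * 10 + (l.foldl calcStep st).2.2
      = st.1 * 100 + st.2.1 * 10 + st.2.2 + (l.map centsOf).sum := by
  induction l generalizing st with
  | nil => simpa using ⟨h1, h2, h3, h4⟩
  | cons x xs ih =>
    simp only [List.all_cons, Bool.and_eq_true] at hok
    obtain ⟨hx, hxs⟩ := hok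
    have hs := calcStep_spec st x hx h1 h2 h3 h4
    have hrec := ih (calcStep st x) hxs hs.1 hs.2.1 hs.2.2.1 hs.2.2.2.1
    simp only [List.foldl_cons, List.map_cons, List.sum_cons]
    exact ⟨hrec.1, hrec.2.1, hrec.2.2.1, hrec.2.2.2.1, by
      have hA := hrec.2.2.2.2
      have hB := hs.2.2.2.2
      omega⟩

-- ===== VERDICT (by name: the statement is the Claim_ definition above) =====
theorem calc_py_spec : Claim_equal_calc_py := by
  intro nombres _ hpre
  unfold Spec_calc_py calc_py calc_py_alt
  have h := foldl_calcStep_spec nombres (0, 0, 0) hpre (by norm_num) (by norm_num)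
    (by norm_num) (by norm_num)
  obtain ⟨b1, b2, b3, b4, hval⟩ := h
  norm_num at hval
  set st := nombres.foldl calcStep (0, 0, 0) with hst
  set T := (nombres.map centsOf).sum with hT
  have e1 : PySem.Int.floordiv T 100 = st.1 := by
    rw [PySem.Int.floordiv_eq_ediv_of_pos (by norm_num : (0:Int) < 100)]; omega
  have e2 : PySem.Int.floordiv (PySem.Int.mod T 100) 10 = st.2.1 := by
    rw [PySem.Int.floordiv_eq_ediv_of_pos (by norm_num : (0:Int) < 10),
        PySem.Int.mod_eq_emod_of_pos (by norm_num : (0:Int) < 100)]; omega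
  have e3 : PySem.Int.mod T 10 = st.2.2 := by
    rw [PySem.Int.mod_eq_emod_of_pos (by norm_num : (0:Int) < 10)]; omega
  rw [fmtA, fmtB, e1, e2, e3]
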